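-- pv_equiv track=rewrite | github.com/aymanashrafmounir/SaintMark-BookingSystem | Music Room Report A4/Music-Room-Report-A4.py | to_eastern_arabic_numerals
-- ===== SOURCE A (Python) =====
-- def to_eastern_arabic_numerals(text):
--     """Converts Western Arabic numerals (0-9) to Eastern Arabic numerals (٠-٩) in a string."""
--     text = str(text)
--     mapping = {
--         "0": "٠", "1": "١", "2": "٢", "3": "٣", "4": "٤",
--         "5": "٥", "6": "٦", "7": "٧", "8": "٨", "9": "٩"
--     }
--     for k, v in mapping.items():
--         text = text.replace(k, v)
--     return text
-- ===== SOURCE B (Python) =====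
-- def to_eastern_arabic_numerals(text):
--     """Converts Western Arabic numerals (0-9) to Eastern Arabic numerals (٠-٩) in a string."""
--     text = str(text)
--     out = []
--     for c in text:
--         if '0' <= c <= '9':
--             out.append(chr(0x0660 + ord(c) - ord('0')))
--         else:
--             out.append(c)
--     return ''.join(out)
-- ===== Notes on version B (the rewrite author's own statement) =====
-- stated objective: simpler
-- what changed: Drops the mapping dict and the ten full-string replace passes entirely: B makes a single pass over the characters, converting each ASCII digit to its Eastern Arabic counterpart by Unicode code-point offset arithmetic and passing every other character through.
import Mathlib
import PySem

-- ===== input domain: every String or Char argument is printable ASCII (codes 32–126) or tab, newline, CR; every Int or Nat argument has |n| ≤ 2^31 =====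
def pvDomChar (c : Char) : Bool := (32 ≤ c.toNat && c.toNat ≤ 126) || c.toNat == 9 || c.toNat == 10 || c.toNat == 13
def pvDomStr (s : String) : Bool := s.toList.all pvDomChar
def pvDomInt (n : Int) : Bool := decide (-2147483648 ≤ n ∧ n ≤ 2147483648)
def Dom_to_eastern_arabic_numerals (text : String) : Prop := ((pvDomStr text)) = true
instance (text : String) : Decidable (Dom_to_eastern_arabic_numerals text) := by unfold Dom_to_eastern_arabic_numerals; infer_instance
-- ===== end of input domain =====

-- B drops the mapping dict and the ten full-string replace passes: a single pass over
-- the characters converts each digit by code-point arithmetic (objective: simpler).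

-- ===== PORT A =====
-- the digit mapping A builds
def pvMapping : PySem.Dict String String :=
  PySem.Dict.ofList [("0", "٠"), ("1", "١"), ("2", "٢"), ("3", "٣"), ("4", "٤"),
                     ("5", "٥"), ("6", "٦"), ("7", "٧"), ("8", "٨"), ("9", "٩")]

-- for k, v in mapping.items(): text = text.replace(k, v); return text
def to_eastern_arabic_numerals (text : String) : String :=
  pvMapping.items.foldl (fun t kv => PySem.Str.replace t kv.1 kv.2) text

-- ===== PORT B =====
-- if '0' <= c <= '9': chr(0x0660 + ord(c) - ord('0')) else c
def pvConvChar (c : Char) : Char :=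
  if '0' ≤ c ∧ c ≤ '9' then Char.ofNat (0x0660 + c.toNat - '0'.toNat) else c

-- the for-loop with its accumulating list `out`, then ''.join(out)
def pvAltGo : List Char → List Char → List Char
  | [], acc => acc.reverse
  | c :: t, acc => pvAltGo t (pvConvChar c :: acc)

def to_eastern_arabic_numerals_alt (text : String) : String :=
  String.ofList (pvAltGo text.toList [])

-- ===== PRECONDITION & SPEC =====
def Spec_to_eastern_arabic_numerals (text : String) (out : String) : Prop := out = to_eastern_arabic_numerals_alt text
instance (text : String) (out : String) : Decidable (Spec_to_eastern_arabic_numerals text out) := by unfold Spec_to_eastern_arabic_numerals; infer_instance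

-- ===== CLAIM (what is proved, stated in full; the proofs are below) =====
def Claim_equal_to_eastern_arabic_numerals : Prop := ∀ (text : String), Dom_to_eastern_arabic_numerals text → Spec_to_eastern_arabic_numerals text (to_eastern_arabic_numerals text)

-- ===== LEMMAS AND PROOFS =====

theorem pv_go_single (a b : Char) : ∀ (l : List Char) (fuel : Nat) (acc : List Char), l.length ≤ fuel →
    PySem.Chars.replace.go [a] [b] fuel l acc = acc.reverse ++ l.map (fun c => if c = a then b else c)
  | [], fuel, acc, _ => by cases fuel <;> simp [PySem.Chars.replace.go]
  | c :: t, fuel + 1, acc, h => by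
    simp only [PySem.Chars.replace.go, List.isPrefixOf]
    by_cases hc : a = c
    · subst hc
      simp [pv_go_single a b t fuel (b :: acc) (by simpa using h)]
    · simp [beq_iff_eq, hc, Ne.symm hc, pv_go_single a b t fuel (c :: acc) (by simpa using h)]

theorem pv_replace_single (a b : Char) (cs : List Char) :
    PySem.Chars.replace cs [a] [b] = cs.map (fun c => if c = a then b else c) := by
  simp [PySem.Chars.replace, pv_go_single a b cs cs.length [] le_rfl]

theorem pv_A_eq_map (s : String) : (to_eastern_arabic_numerals s).toList = s.toList.map pvConvChar := by
  show (PySem.Str.replace (PySem.Str.replace (PySem.Str.replace (PySem.Str.replace (PySem.Str.replace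
        (PySem.Str.replace (PySem.Str.replace (PySem.Str.replace (PySem.Str.replace (PySem.Str.replace
        s "0" "٠") "1" "١") "2" "٢") "3" "٣") "4" "٤") "5" "٥") "6" "٦") "7" "٧") "8" "٨") "9" "٩").toList
      = s.toList.map pvConvChar
  simp only [PySem.Str.toList_replace,
    show ("0":String).toList = ['0'] from rfl, show ("١":String).toList = ['١'] from rfl,
    show ("1":String).toList = ['1'] from rfl, show ("٠":String).toList = ['٠'] from rfl,
    show ("2":String).toList = ['2'] from rfl, show ("٢":String).toList = ['٢'] from rfl,
    show ("3":String).toList = ['3'] from rfl, show ("٣":String).toList = ['٣'] from rfl,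
    show ("4":String).toList = ['4'] from rfl, show ("٤":String).toList = ['٤'] from rfl,
    show ("5":String).toList = ['5'] from rfl, show ("٥":String).toList = ['٥'] from rfl,
    show ("6":String).toList = ['6'] from rfl, show ("٦":String).toList = ['٦'] from rfl,
    show ("7":String).toList = ['7'] from rfl, show ("٧":String).toList = ['٧'] from rfl,
    show ("8":String).toList = ['8'] from rfl, show ("٨":String).toList = ['٨'] from rfl,
    show ("9":String).toList = ['9'] from rfl, show ("٩":String).toList = ['٩'] from rfl,
    pv_replace_single, List.map_map]
  apply List.map_congr_left
  intro c _
  by_cases h0 : c = '0'; · subst h0; rfl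
  by_cases h1 : c = '1'; · subst h1; rfl
  by_cases h2 : c = '2'; · subst h2; rfl
  by_cases h3 : c = '3'; · subst h3; rfl
  by_cases h4 : c = '4'; · subst h4; rfl
  by_cases h5 : c = '5'; · subst h5; rfl
  by_cases h6 : c = '6'; · subst h6; rfl
  by_cases h7 : c = '7'; · subst h7; rfl
  by_cases h8 : c = '8'; · subst h8; rfl
  by_cases h9 : c = '9'; · subst h9; rfl
  have hrange : ¬('0' ≤ c ∧ c ≤ '9') := by
    rintro ⟨hl, hr⟩
    rw [Char.le_def] at hl hr
    have h48 : 48 ≤ c.toNat := hl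
    have h57 : c.toNat ≤ 57 := hr
    have hv : ∀ d : Char, c.toNat = d.toNat → c = d := fun d h =>
      Char.ext (UInt32.toNat_inj.mp h)
    interval_cases h : c.toNat
    · exact h0 (hv '0' (by decide))
    · exact h1 (hv '1' (by decide))
    · exact h2 (hv '2' (by decide))
    · exact h3 (hv '3' (by decide))
    · exact h4 (hv '4' (by decide))
    · exact h5 (hv '5' (by decide))
    · exact h6 (hv '6' (by decide))
    · exact h7 (hv '7' (by decide))
    · exact h8 (hv '8' (by decide))
    · exact h9 (hv '9' (by decide))
  simp [Function.comp, pvConvChar, hrange, h0, h1, h2, h3, h4, h5, h6, h7, h8, h9]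

theorem pv_altGo_eq (l acc : List Char) : pvAltGo l acc = acc.reverse ++ l.map pvConvChar := by
  induction l generalizing acc with
  | nil => simp [pvAltGo]
  | cons c t ih => simp [pvAltGo, ih]

theorem pv_B_eq_map (s : String) : (to_eastern_arabic_numerals_alt s).toList = s.toList.map pvConvChar := by
  simp [to_eastern_arabic_numerals_alt, pv_altGo_eq]

theorem pv_toList_inj (s t : String) (h : s.toList = t.toList) : s = t := by
  have := congrArg String.ofList h
  simpa using this

-- ===== VERDICT (by name: the statement is the Claim_ definition above) =====
theorem to_eastern_arabic_numerals_spec : Claim_equal_to_eastern_arabic_numerals := by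
  intro text _
  unfold Spec_to_eastern_arabic_numerals
  exact pv_toList_inj _ _ (by rw [pv_A_eq_map, pv_B_eq_map])
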